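-- pv_equiv track=rewrite | github.com/Cdk29/circular_RNA | circRNA_set_of_functions.py | poly_U_liker
-- ===== SOURCE A (Python) =====
-- def poly_U_liker(sequence):
--     #micro-RNA binding site with hight local content of  A and U perform the best
--     #MicroRNAs: Target Recognition and Regulatory Functions
--     #DOI 10.1016/j.cell.2009.01.002
--     #there is some protein which seems to target polyU so, every 3 U a A is put instead of a U
--
--     count=0
--     returned_sequence=""
--     for i in sequence:
--         if i=="X" or i=="W":
--             if count==3:
--                 returned_sequence=returned_sequence+"A"
--                 count=0
--             else:
--                 returned_sequence=returned_sequence+"U"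
--                 count=count+1
--         else:
--             returned_sequence=returned_sequence+i
--
--     return returned_sequence
-- ===== SOURCE B (Python) =====
-- def poly_U_liker(sequence):
--     # Two-pass: collect the indices of X/W once, then overwrite every 4th such
--     # position with 'A' and the rest with 'U' in a mutable char list.
--     chars = list(sequence)
--     hits = [i for i, c in enumerate(chars) if c == "X" or c == "W"]
--     for n, i in enumerate(hits):
--         chars[i] = "A" if n % 4 == 3 else "U"
--     return "".join(chars)
-- ===== Notes on version B (the rewrite author's own statement) =====
-- stated objective: alternative
-- what changed: B replaces the single stateful pass with string concatenation by a two-pass scheme: it first collects the indices of all X/W characters, then overwrites every 4th such index with the adenine letter and the remaining ones with the uracil letter in a mutable char list joined at the end.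
import Mathlib
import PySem

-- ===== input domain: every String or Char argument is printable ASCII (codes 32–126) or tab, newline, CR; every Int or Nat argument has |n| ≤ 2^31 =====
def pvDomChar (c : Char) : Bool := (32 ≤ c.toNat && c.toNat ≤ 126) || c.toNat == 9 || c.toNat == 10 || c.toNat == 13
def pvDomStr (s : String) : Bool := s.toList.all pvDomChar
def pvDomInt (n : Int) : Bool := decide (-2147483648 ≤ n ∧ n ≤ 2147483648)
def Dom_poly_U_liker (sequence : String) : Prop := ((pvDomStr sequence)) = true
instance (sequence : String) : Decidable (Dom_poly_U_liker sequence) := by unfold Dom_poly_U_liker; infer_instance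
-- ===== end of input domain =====

-- ===== PORT A =====
-- B rewrites A as two passes (collect X/W indices, then overwrite every 4th with adenine, others with uracil); alternative structure, same cost.
-- A: one pass with a reset-at-3 counter, appending to an accumulated string.
def poly_U_liker (sequence : String) : String :=
  let st := sequence.toList.foldl
    (fun (st : Int × List Char) i =>
      if i == 'X' || i == 'W' then
        if st.1 == 3 then (0, st.2 ++ ['A'])
        else (st.1 + 1, st.2 ++ ['U'])
      else (st.1, st.2 ++ [i]))
    (0, [])
  String.ofList st.2

-- ===== PORT B =====
-- B: collect the indices of X/W chars, then set every 4th such index to 'A', the rest to 'U'.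
def poly_U_liker_alt (sequence : String) : String :=
  let chars := sequence.toList
  let hits := ((PySem.List.enumerate chars).filter (fun p => p.2 == 'X' || p.2 == 'W')).map (·.1)
  let chars := (PySem.List.enumerate hits).foldl
      (fun cs p => PySem.List.pySetD cs p.2 (if PySem.Int.mod p.1 4 == 3 then 'A' else 'U')) chars
  String.ofList chars

-- ===== PRECONDITION & SPEC =====
def Spec_poly_U_liker (sequence : String) (out : String) : Prop := out = poly_U_liker_alt sequence
instance (sequence : String) (out : String) : Decidable (Spec_poly_U_liker sequence out) := by unfold Spec_poly_U_liker; infer_instance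

-- ===== CLAIM (what is proved, stated in full; the proofs are below) =====
def Claim_equal_poly_U_liker : Prop := ∀ (sequence : String), Dom_poly_U_liker sequence → Spec_poly_U_liker sequence (poly_U_liker sequence)

-- ===== LEMMAS AND PROOFS =====

-- the common specification: the j-th X/W character (0-based, counting from k) becomes 'A' when j % 4 = 3, else 'U'
def pvG (n : Int) : Char := if n % 4 == 3 then 'A' else 'U'

def pvF : List Char → Int → List Char
  | [], _ => []
  | c :: cs, k =>
    if c == 'X' || c == 'W' then pvG k :: pvF cs (k + 1)
    else c :: pvF cs k

def pvHits (cs : List Char) (s : Int) : List Int :=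
  ((PySem.List.enumerate cs s).filter (fun p => p.2 == 'X' || p.2 == 'W')).map (·.1)

theorem pvHits_shift (cs : List Char) (s : Int) :
    pvHits cs (s + 1) = (pvHits cs s).map (· + 1) := by
  induction cs generalizing s with
  | nil => simp [pvHits, PySem.List.enumerate_nil]
  | cons c cs ih =>
    simp only [pvHits, PySem.List.enumerate_cons, List.filter_cons] at *
    by_cases h : (c == 'X' || c == 'W') = true <;>
      simp [h, ih (s + 1), List.map_map]

theorem pvHits_nonneg (cs : List Char) (s : Int) (hs : 0 ≤ s) :
    ∀ i ∈ pvHits cs s, 0 ≤ i := by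
  induction cs generalizing s with
  | nil => simp [pvHits, PySem.List.enumerate_nil]
  | cons c cs ih =>
    intro i hi
    simp only [pvHits, PySem.List.enumerate_cons, List.filter_cons] at hi
    by_cases h : (c == 'X' || c == 'W') = true <;> simp [h] at hi
    · rcases hi with hi | hi
      · omega
      · exact ih (s + 1) (by omega) i (by simpa [pvHits] using hi)
    · exact ih (s + 1) (by omega) i (by simpa [pvHits] using hi)

theorem pvSetD_cons (x : Char) (cs : List Char) (i : Int) (v : Char) (hi : 0 ≤ i) :
    PySem.List.pySetD (x :: cs) (i + 1) v = x :: PySem.List.pySetD cs i v := by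
  rw [PySem.List.pySetD_of_nonneg (x :: cs) v (by omega : (0:Int) ≤ i + 1),
    PySem.List.pySetD_of_nonneg cs v hi]
  have : (i + 1).toNat = i.toNat + 1 := by omega
  simp [this]

-- pushing the B-side fold through a cons when every target index comes from the tail
theorem pvFold_cons (hs : List Int) (hnn : ∀ i ∈ hs, 0 ≤ i) (x : Char) (cs : List Char) (m : Int) (g : Int → Char) :
    (PySem.List.enumerate (hs.map (· + 1)) m).foldl
        (fun a p => PySem.List.pySetD a p.2 (g p.1)) (x :: cs)
      = x :: (PySem.List.enumerate hs m).foldl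
        (fun a p => PySem.List.pySetD a p.2 (g p.1)) cs := by
  induction hs generalizing cs m with
  | nil => simp [PySem.List.enumerate_nil]
  | cons i hs ih =>
    simp only [List.map_cons, PySem.List.enumerate_cons, List.foldl_cons]
    rw [pvSetD_cons x cs i (g m) (hnn i (by simp))]
    exact ih (fun j hj => hnn j (by simp [hj])) _ (m + 1)

theorem pvB_main (cs : List Char) (m : Int) :
    (PySem.List.enumerate (pvHits cs 0) m).foldl
        (fun a p => PySem.List.pySetD a p.2 (pvG p.1)) cs
      = pvF cs m := by
  induction cs generalizing m with
  | nil => simp [pvHits, pvF, PySem.List.enumerate_nil]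
  | cons c cs ih =>
    have hsh1 : pvHits cs 1 = (pvHits cs 0).map (· + 1) := by
      simpa using pvHits_shift cs 0
    have hsh : pvHits (c :: cs) 0 =
        (if (c == 'X' || c == 'W') = true then [(0 : Int)] else []) ++ (pvHits cs 0).map (· + 1) := by
      rw [← hsh1]
      simp only [pvHits, PySem.List.enumerate_cons, List.filter_cons]
      by_cases h : (c == 'X' || c == 'W') = true <;> simp [h]
    by_cases h : (c == 'X' || c == 'W') = true
    · rw [hsh]; simp only [h, if_pos]
      simp only [List.singleton_append, PySem.List.enumerate_cons, List.foldl_cons]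
      rw [show PySem.List.pySetD (c :: cs) (0 : Int) (pvG m) = pvG m :: cs from by
        simpa using PySem.List.pySetD_natCast (c :: cs) 0 (pvG m)]
      rw [pvFold_cons (pvHits cs 0) (pvHits_nonneg cs 0 le_rfl) (pvG m) cs (m + 1) pvG, ih (m + 1)]
      simp [pvF, h]
    · rw [hsh]; simp only [h, if_neg, Bool.not_eq_true]
      simp only [List.nil_append]
      rw [pvFold_cons (pvHits cs 0) (pvHits_nonneg cs 0 le_rfl) c cs m pvG, ih m]
      simp [pvF, h]

theorem pvA_main (cs : List Char) (acc : List Char) (n0 : Int) (hn : 0 ≤ n0) :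
    (cs.foldl
      (fun (st : Int × List Char) i =>
        if i == 'X' || i == 'W' then
          if st.1 == 3 then (0, st.2 ++ ['A'])
          else (st.1 + 1, st.2 ++ ['U'])
        else (st.1, st.2 ++ [i]))
      (n0 % 4, acc)).2 = acc ++ pvF cs n0 := by
  induction cs generalizing acc n0 with
  | nil => simp [pvF]
  | cons c cs ih =>
    simp only [List.foldl_cons]
    by_cases h : (c == 'X' || c == 'W') = true
    · by_cases h3 : n0 % 4 = 3
      · have e1 : ((n0 % 4 : Int) == 3) = true := by simp [h3]
        have e0 : (0 : Int) = (n0 + 1) % 4 := by omega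
        simp only [h, if_pos, e1]
        rw [show ((0 : Int), acc ++ ['A']) = ((n0 + 1) % 4, acc ++ ['A']) from by rw [← e0]]
        rw [ih (acc ++ ['A']) (n0 + 1) (by omega)]
        simp [pvF, pvG, h, h3]
      · have e1 : ((n0 % 4 : Int) == 3) = false := by simp [h3]
        have e0 : n0 % 4 + 1 = (n0 + 1) % 4 := by omega
        simp only [h, if_pos, e1, Bool.false_eq_true, if_false]
        rw [e0, ih (acc ++ ['U']) (n0 + 1) (by omega)]
        simp [pvF, pvG, h, h3]
    · simp only [h, Bool.false_eq_true, if_false]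
      rw [ih (acc ++ [c]) n0 hn]
      simp [pvF, h]

-- ===== VERDICT (by name: the statement is the Claim_ definition above) =====
theorem poly_U_liker_spec : Claim_equal_poly_U_liker := by
  intro sequence _
  unfold Spec_poly_U_liker poly_U_liker poly_U_liker_alt
  have hmod : ∀ p : Int × Int,
      (if PySem.Int.mod p.1 4 == 3 then 'A' else 'U') = pvG p.1 := by
    intro p; rw [PySem.Int.mod_eq_emod_of_pos (by norm_num)]; rfl
  simp only [hmod]
  have hB := pvB_main sequence.toList 0
  have hA := pvA_main sequence.toList [] 0 le_rfl
  simp only [show ((0 : Int) % 4) = 0 from rfl] at hA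
  simp only [pvHits] at hB
  rw [hA]
  congr 1
  rw [List.nil_append, ← hB]
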